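-- pv_equiv track=rewrite | github.com/jnchengtarantino/AoC2025 | d8.py | part1
-- ===== SOURCE A (Python) =====
-- from collections import Counter, defaultdict
-- from math import lcm, prod
--
-- def part1(lines,nMin):
--     boxes = parseInput(lines)
--     boxDistance = [(i, j, distSq(boxes[i],boxes[j])) for i in range(len(boxes)) for j in range(i + 1, len(boxes))]
--     sortedBoxInd = sorted(boxDistance, key = lambda x: x[2])[:nMin]
--
--     disjSet = DisjSet(len(boxes))
--     for i, j, _ in sortedBoxInd:
--         disjSet.join(i,j)
--     count = disjSet.getCounter()
--     return prod([c for _, c in count.most_common(3)])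
--
-- def parseInput(lines: list[str]):
--     return [tuple([int(i) for i in line.strip().split(',')]) for line in lines]
--
-- def distSq(a: tuple[int,int,int], b: tuple[int,int,int]):
--     return sum([ (a[i]-b[i]) ** 2 for i in range(3)])
--
-- class DisjSet:
--     def __init__(self, size):
--         self.parent = list(range(size))
--
--     def find(self, i):
--         if self.parent[i] == i: return i
--         else:
--             rep = self.find(self.parent[i])
--             self.parent[i] == rep
--             return rep
--
--     def join(self, i, j):
--         iRep = self.find(i)
--         jRep = self.find(j)
--         self.parent[iRep] = jRep
--
--     def getCounter(self):
--         return Counter([self.find(i) for i in range(len(self.parent))])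
--
--     def isWhole(self):
--         return len(set([self.find(i) for i in range(len(self.parent))])) == 1
-- ===== SOURCE B (Python) =====
-- def part1(lines, nMin):
--     boxes = parseInput(lines)
--     n = len(boxes)
--     edges = [(i, j, distSq(boxes[i], boxes[j])) for i in range(n) for j in range(i + 1, n)]
--     chosen = sorted(edges, key=lambda e: e[2])[:nMin]
--     # merge components by eager relabelling: labels[k] is the representative of k's component
--     labels = list(range(n))
--     for i, j, _ in chosen:
--         li, lj = labels[i], labels[j]
--         labels = [lj if l == li else l for l in labels]
--     counts = {}
--     for l in labels:
--         counts[l] = counts.get(l, 0) + 1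
--     ans = 1
--     for c in sorted(counts.values(), reverse=True)[:3]:
--         ans *= c
--     return ans
--
-- def parseInput(lines):
--     return [tuple([int(i) for i in line.strip().split(',')]) for line in lines]
--
-- def distSq(a, b):
--     return sum([(a[i] - b[i]) ** 2 for i in range(3)])
-- ===== Notes on version B (the rewrite author's own statement) =====
-- stated objective: alternative
-- what changed: Replaces the recursive union-find (parent array with pointer-chasing find, Counter + most_common) by eager label propagation: a direct label array merged with one linear relabel pass per chosen edge, then a plain dict count and product of the three largest sizes taken from a descending sort of the values.
import Mathlib
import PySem

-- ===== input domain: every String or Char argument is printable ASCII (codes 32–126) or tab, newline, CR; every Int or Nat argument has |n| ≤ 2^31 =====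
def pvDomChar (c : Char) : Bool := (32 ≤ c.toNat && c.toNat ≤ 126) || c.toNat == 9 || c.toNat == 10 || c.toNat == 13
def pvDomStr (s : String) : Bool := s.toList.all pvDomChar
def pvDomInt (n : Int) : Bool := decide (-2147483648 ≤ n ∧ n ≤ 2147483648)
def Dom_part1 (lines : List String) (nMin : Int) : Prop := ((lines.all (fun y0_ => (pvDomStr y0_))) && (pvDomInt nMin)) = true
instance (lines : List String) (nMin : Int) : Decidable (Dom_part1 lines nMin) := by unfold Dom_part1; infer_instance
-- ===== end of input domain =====

-- B replaces A's recursive union-find + Counter.most_common by eager label propagation (one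
-- linear relabel pass per chosen edge) and a plain dict count with a descending sort of the sizes.

-- ===== PORT A =====
-- shared helpers: parseInput and distSq are identical in Source A and Source B
def pvParts (line : String) : List String :=
  (PySem.Str.split? (PySem.Str.strip line) ",").getD []    -- sep "," ≠ "" so split? is always some

def pvParseInput (lines : List String) : List (List Int) :=
  lines.map (fun line => (pvParts line).map (fun p => (PySem.Int.ofStr? p).getD 0))
  -- getD 0: Pre_part1 guarantees int() succeeds on every piece

def pvDistSq (a b : List Int) : Int :=
  ((PySem.List.pyRange 0 3 1).map
    (fun i => ((PySem.List.pyGet? a i).getD 0 - (PySem.List.pyGet? b i).getD 0) ^ 2)).sum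
  -- getD 0: Pre_part1 guarantees every box has ≥ 3 coordinates whenever a pair exists

def pvEdges (boxes : List (List Int)) : List (Int × Int × Int) :=
  (PySem.List.pyRange 0 boxes.length 1).flatMap (fun i =>
    (PySem.List.pyRange (i + 1) boxes.length 1).map (fun j =>
      (i, j, pvDistSq ((PySem.List.pyGet? boxes i).getD []) ((PySem.List.pyGet? boxes j).getD []))))

-- DisjSet.find: recursion on the parent chain; fuel = len(parent) is always enough because the
-- parent array built by join is an acyclic forest (proved below); Python has no fuel.
def pvFind (parent : List Int) : Nat → Int → Int
  | 0, i => i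
  | fuel + 1, i =>
    let p := (PySem.List.pyGet? parent i).getD i
    if p = i then i else pvFind parent fuel p

-- the loop 'for i, j, _ in sortedBoxInd: disjSet.join(i, j)'
def pvJoinAll (parent : List Int) (es : List (Int × Int × Int)) : List Int :=
  es.foldl (fun par e =>
    let iRep := pvFind par par.length e.1
    let jRep := pvFind par par.length e.2.1
    par.set iRep.toNat jRep) parent

-- Counter(keys): counts in first-occurrence key order
def pvCounter (keys : List Int) : PySem.Dict Int Int :=
  keys.foldl (fun d k => d.insert k (d.getD k 0 + 1)) PySem.Dict.empty

def part1 (lines : List String) (nMin : Int) : Int :=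
  let boxes := pvParseInput lines
  let boxDistance := pvEdges boxes
  let sortedBoxInd := PySem.List.slice (PySem.List.sorted boxDistance (fun e => e.2.2) false) none (some nMin)
  let parentF := pvJoinAll (PySem.List.pyRange 0 boxes.length 1) sortedBoxInd
  let count := pvCounter ((PySem.List.pyRange 0 parentF.length 1).map (fun i => pvFind parentF parentF.length i))
  -- count.most_common(3) = the 3 items largest by value, stable = sorted desc by value, first 3
  let mc := (PySem.List.sorted count.items (fun p => p.2) true).take 3
  (mc.map (fun p => p.2)).foldl (· * ·) 1

-- ===== PORT B =====
def part1_alt (lines : List String) (nMin : Int) : Int :=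
  let boxes := pvParseInput lines
  let n := boxes.length
  let edges := pvEdges boxes
  let chosen := PySem.List.slice (PySem.List.sorted edges (fun e => e.2.2) false) none (some nMin)
  let labels := chosen.foldl (fun labels e =>
      let li := (PySem.List.pyGet? labels e.1).getD 0
      let lj := (PySem.List.pyGet? labels e.2.1).getD 0
      labels.map (fun l => if l = li then lj else l))
    (PySem.List.pyRange 0 n 1)
  let counts := labels.foldl (fun d l => d.insert l (d.getD l 0 + 1)) PySem.Dict.empty
  let sizes := PySem.List.slice (PySem.List.sorted (PySem.Dict.values counts) (fun x => x) true) none (some 3)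
  sizes.foldl (fun ans c => ans * c) 1

-- ===== PRECONDITION & SPEC =====
-- Pre_ excludes exactly the inputs where the Python A raises: a piece on which int() raises
-- ValueError, and (when there are ≥ 2 boxes, so distSq runs) a line with fewer than 3 fields
-- (IndexError).
def Pre_part1 (lines : List String) (nMin : Int) : Prop :=
  ∀ line ∈ lines,
    (∀ p ∈ pvParts line, (PySem.Int.ofStr? p).isSome = true) ∧
    (2 ≤ lines.length → 3 ≤ (pvParts line).length)

instance (lines : List String) (nMin : Int) : Decidable (Pre_part1 lines nMin) := by
  unfold Pre_part1; infer_instance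

def pvWitness_part1 : List String × Int := (["1,2,3", "1,2,4", "9,9,9"], 2)

def Spec_part1 (lines : List String) (nMin : Int) (out : Int) : Prop := out = part1_alt lines nMin
instance (lines : List String) (nMin : Int) (out : Int) : Decidable (Spec_part1 lines nMin out) := by unfold Spec_part1; infer_instance

-- ===== CLAIM (what is proved, stated in full; the proofs are below) =====
def Claim_equal_part1 : Prop := ∀ (lines : List String) (nMin : Int), Dom_part1 lines nMin → Pre_part1 lines nMin → Spec_part1 lines nMin (part1 lines nMin)


-- ===== LEMMAS AND PROOFS =====

-- parent entry as a Nat (the parent arrays only ever hold indices 0..n-1)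
def pvPn (par : List Int) (k : Nat) : Nat := ((par[k]?.getD (k : Int)).toNat)

-- the parent array is an acyclic forest over 0..n-1: entries in range, and a measure that
-- strictly decreases along parent links and vanishes at roots
def pvForest (n : Nat) (par : List Int) : Prop :=
  par.length = n ∧
  (∀ k, k < n → par[k]? = some ((pvPn par k : Nat) : Int) ∧ pvPn par k < n) ∧
  ∃ m : Nat → Nat, ∀ k, k < n →
    (pvPn par k = k → m k = 0) ∧ (pvPn par k ≠ k → m (pvPn par k) < m k)

-- a parent chain: consecutive parent links ending at a root
def pvChain (par : List Int) : List Nat → Prop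
  | [] => False
  | [x] => pvPn par x = x
  | x :: y :: t => pvPn par x = y ∧ y ≠ x ∧ pvChain par (y :: t)

theorem pvChain_ne_nil {par : List Int} {c : List Nat} (h : pvChain par c) : c ≠ [] := by
  intro he; subst he; exact h

theorem pvFind_step {par : List Int} {k : Nat} (hk : par[k]? = some ((pvPn par k : Nat) : Int))
    (fuel : Nat) :
    pvFind par (fuel + 1) (k : Int) =
      (if pvPn par k = k then (k : Int) else pvFind par fuel ((pvPn par k : Nat) : Int)) := by
  simp only [pvFind, PySem.List.pyGet?_natCast, hk, Option.getD_some]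
  by_cases h : pvPn par k = k
  · simp [h]
  · rw [if_neg h, if_neg]
    intro he
    exact h (by exact_mod_cast he)

theorem pvFind_chain {par : List Int} {c : List Nat} (hc : pvChain par c)
    (hent : ∀ x ∈ c, par[x]? = some ((pvPn par x : Nat) : Int)) :
    ∀ (fuel : Nat) (k r : Nat), c.head? = some k → c.getLast? = some r → c.length ≤ fuel →
      pvFind par fuel (k : Int) = (r : Int) := by
  induction c with
  | nil => exact absurd rfl (pvChain_ne_nil hc)
  | cons x t ih =>
    intro fuel k r hk hr hlen
    simp only [List.head?_cons, Option.some.injEq] at hk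
    subst hk
    match t, hc, fuel with
    | [], hc, 0 => simp at hlen
    | [], hc, fuel + 1 =>
      have hx : par[x]? = some ((pvPn par x : Nat) : Int) := hent x (by simp)
      rw [pvFind_step hx, if_pos (show pvPn par x = x from hc)]
      simp only [List.getLast?_singleton, Option.some.injEq] at hr
      rw [hr]
    | y :: t', hc, 0 => simp at hlen
    | y :: t', hc, fuel + 1 =>
      obtain ⟨h1, h2, h3⟩ := hc
      have hx : par[x]? = some ((pvPn par x : Nat) : Int) := hent x (by simp)
      rw [pvFind_step hx, if_neg (fun he => h2 (h1.symm.trans he)), h1]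
      have hr' : (y :: t').getLast? = some r := by
        rwa [List.getLast?_cons_cons] at hr
      exact ih h3 (fun z hz => hent z (by simp [hz])) fuel y r rfl hr'
        (by simpa using Nat.le_of_succ_le_succ hlen)

theorem pvChain_exists {n : Nat} {par : List Int} {m : Nat → Nat}
    (hent : ∀ k, k < n → par[k]? = some ((pvPn par k : Nat) : Int) ∧ pvPn par k < n)
    (hm : ∀ k, k < n → (pvPn par k = k → m k = 0) ∧ (pvPn par k ≠ k → m (pvPn par k) < m k)) :
    ∀ k, k < n → ∃ c, pvChain par c ∧ c.head? = some k ∧ (∀ x ∈ c, x < n) ∧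
      c.Pairwise (fun a b => m b < m a) := by
  have main : ∀ M k, k < n → m k ≤ M → ∃ c, pvChain par c ∧ c.head? = some k ∧
      (∀ x ∈ c, x < n) ∧ c.Pairwise (fun a b => m b < m a) := by
    intro M
    induction M with
    | zero =>
      intro k hk hM
      by_cases h : pvPn par k = k
      · exact ⟨[k], h, rfl, by simpa using hk, List.pairwise_singleton _ _⟩
      · exact absurd ((hm k hk).2 h) (by omega)
    | succ M ih =>
      intro k hk hM
      by_cases h : pvPn par k = k
      · exact ⟨[k], h, rfl, by simpa using hk, List.pairwise_singleton _ _⟩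
      · have hdec := (hm k hk).2 h
        have hpk : pvPn par k < n := (hent k hk).2
        obtain ⟨c, hc, hhead, hn', hp⟩ := ih (pvPn par k) hpk (by omega)
        match c, hc, hhead with
        | [], hc, hhead => exact absurd rfl (pvChain_ne_nil hc)
        | y :: t, hc, hhead =>
          simp only [List.head?_cons, Option.some.injEq] at hhead
          subst hhead
          refine ⟨k :: pvPn par k :: t, ⟨rfl, fun he => h he, hc⟩, rfl, ?_, ?_⟩
          · intro x hx
            rcases List.mem_cons.mp hx with h1 | h1
            · subst h1; exact hk
            · exact hn' x h1
          · refine List.pairwise_cons.mpr ⟨?_, hp⟩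
            intro x hx
            rcases List.mem_cons.mp hx with h1 | h1
            · subst h1; omega
            · have := (List.pairwise_cons.mp hp).1 x h1
              omega
  exact fun k hk => main (m k) k hk le_rfl

theorem pvChain_len_le {n : Nat} {m : Nat → Nat} {c : List Nat}
    (hn : ∀ x ∈ c, x < n) (hp : c.Pairwise (fun a b => m b < m a)) : c.length ≤ n := by
  have nd : c.Nodup := hp.imp (fun {a b} h he => by subst he; omega)
  calc c.length = c.toFinset.card := (List.toFinset_card_of_nodup nd).symm
    _ ≤ (Finset.range n).card := Finset.card_le_card
        (fun x hx => Finset.mem_range.mpr (hn x (List.mem_toFinset.mp hx)))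
    _ = n := Finset.card_range n

theorem pvChain_getLast_root {par : List Int} {c : List Nat} (hc : pvChain par c)
    {r : Nat} (hr : c.getLast? = some r) : pvPn par r = r := by
  induction c with
  | nil => exact absurd rfl (pvChain_ne_nil hc)
  | cons x t ih =>
    match t, hc, hr with
    | [], hc, hr =>
      simp only [List.getLast?_singleton, Option.some.injEq] at hr
      subst hr; exact hc
    | y :: t', hc, hr =>
      exact ih hc.2.2 (by rwa [List.getLast?_cons_cons] at hr)

theorem pvChain_mem_suffix {par : List Int} {c : List Nat} (hc : pvChain par c) :
    ∀ x ∈ c, ∃ c', pvChain par c' ∧ c'.head? = some x ∧ c'.length ≤ c.length ∧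
      (∀ y ∈ c', y ∈ c) ∧ c'.getLast? = c.getLast? := by
  induction c with
  | nil => exact absurd rfl (pvChain_ne_nil hc)
  | cons z t ih =>
    intro x hx
    rcases List.mem_cons.mp hx with h1 | h1
    · refine ⟨z :: t, hc, ?_, le_rfl, fun y hy => hy, rfl⟩
      simp [h1]
    · match t, hc, h1 with
      | [], hc, h1 => exact absurd h1 (by simp)
      | y :: t', hc, h1 =>
        obtain ⟨c', hc', hh, hl, hm', hg⟩ := ih hc.2.2 x h1
        refine ⟨c', hc', hh, by simpa using Nat.le_succ_of_le hl,
          fun y hy => List.mem_cons_of_mem _ (hm' y hy), ?_⟩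
        rw [hg, List.getLast?_cons_cons]

theorem pvChain_root_mem {par : List Int} {c : List Nat} (hc : pvChain par c)
    {x : Nat} (hx : x ∈ c) (hroot : pvPn par x = x) : c.getLast? = some x := by
  induction c with
  | nil => exact absurd rfl (pvChain_ne_nil hc)
  | cons z t ih =>
    match t, hc with
    | [], hc =>
      simp only [List.mem_singleton] at hx
      subst hx; rfl
    | y :: t', hc =>
      rcases List.mem_cons.mp hx with h1 | h1
      · subst h1
        exact absurd (hc.1.symm.trans hroot) hc.2.1
      · rw [List.getLast?_cons_cons]
        exact ih hc.2.2 h1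

theorem pvChain_congr {par par' : List Int} {c : List Nat}
    (h : ∀ x ∈ c, pvPn par' x = pvPn par x) (hc : pvChain par c) : pvChain par' c := by
  induction c with
  | nil => exact hc
  | cons x t ih =>
    match t, hc with
    | [], hc => exact (h x (by simp)).trans hc
    | y :: t', hc =>
      exact ⟨(h x (by simp)).trans hc.1, hc.2.1,
        ih (fun z hz => h z (List.mem_cons_of_mem _ hz)) hc.2.2⟩

theorem pvChain_getLast?_exists {par : List Int} {c : List Nat} (hc : pvChain par c) :
    ∃ r, c.getLast? = some r := by
  cases hg : c.getLast? with
  | none => exact absurd (List.getLast?_eq_none_iff.mp hg) (pvChain_ne_nil hc)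
  | some r => exact ⟨r, rfl⟩

theorem pvFind_root_self {par : List Int} {k : Nat}
    (hk : par[k]? = some ((pvPn par k : Nat) : Int)) (hroot : pvPn par k = k)
    {fuel : Nat} (hf : 1 ≤ fuel) : pvFind par fuel (k : Int) = (k : Int) := by
  obtain ⟨f, rfl⟩ := Nat.exists_eq_add_of_le hf
  rw [Nat.add_comm, pvFind_step hk, if_pos hroot]

theorem forest_find {n : Nat} {par : List Int} (h : pvForest n par) {k : Nat} (hk : k < n) :
    ∃ r : Nat, r < n ∧ pvFind par n (k : Int) = (r : Int) ∧ pvPn par r = r := by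
  obtain ⟨hlen, hent, m, hm⟩ := h
  obtain ⟨c, hc, hh, hn', hp⟩ := pvChain_exists hent hm k hk
  obtain ⟨r, hg⟩ := pvChain_getLast?_exists hc
  have hr_mem : r ∈ c := List.mem_of_getLast? hg
  refine ⟨r, hn' r hr_mem, ?_, pvChain_getLast_root hc hg⟩
  exact pvFind_chain hc (fun x hx => (hent x (hn' x hx)).1) n k r hh hg
    (pvChain_len_le hn' hp)

theorem pvChain_snoc {par : List Int} {rI rJ : Nat} (hIJ : rI ≠ rJ)
    (hpn_eq : pvPn (par.set rI (rJ : Int)) rI = rJ)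
    (hpn_ne : ∀ k, k ≠ rI → pvPn (par.set rI (rJ : Int)) k = pvPn par k)
    (hrJ' : pvPn (par.set rI (rJ : Int)) rJ = rJ) :
    ∀ c, pvChain par c → c.getLast? = some rI → c.Nodup →
      pvChain (par.set rI (rJ : Int)) (c ++ [rJ]) := by
  intro c
  induction c with
  | nil => intro hc _ _; exact absurd rfl (pvChain_ne_nil hc)
  | cons x t ih =>
    intro hc hg hnd
    match t, hc, hg, hnd with
    | [], hc, hg, hnd =>
      simp only [List.getLast?_singleton, Option.some.injEq] at hg
      subst hg
      exact ⟨hpn_eq, fun he => hIJ he.symm, hrJ'⟩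
    | y :: t', hc, hg, hnd =>
      rw [List.getLast?_cons_cons] at hg
      have hxI : x ≠ rI := by
        intro he; subst he
        exact (List.nodup_cons.mp hnd).1 (List.mem_of_getLast? hg)
      exact ⟨(hpn_ne x hxI).trans hc.1, hc.2.1,
        ih hc.2.2 hg (List.nodup_cons.mp hnd).2⟩

theorem pvFind_unroll {n : Nat} {par : List Int} {m : Nat → Nat}
    (hent : ∀ k, k < n → par[k]? = some ((pvPn par k : Nat) : Int) ∧ pvPn par k < n)
    (hm : ∀ k, k < n → (pvPn par k = k → m k = 0) ∧ (pvPn par k ≠ k → m (pvPn par k) < m k))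
    {k : Nat} (hk : k < n) (hne : pvPn par k ≠ k) :
    pvFind par n (k : Int) = pvFind par n ((pvPn par k : Nat) : Int) := by
  obtain ⟨c, hc, hh, hn', hp⟩ := pvChain_exists hent hm k hk
  obtain ⟨r, hg⟩ := pvChain_getLast?_exists hc
  have hclen := pvChain_len_le hn' hp
  match c, hc, hh, hg, hn', hp, hclen with
  | [x], hc, hh, hg, hn', hp, hclen =>
    simp only [List.head?_cons, Option.some.injEq] at hh
    subst hh
    exact absurd hc hne
  | x :: y :: t, hc, hh, hg, hn', hp, hclen =>
    simp only [List.head?_cons, Option.some.injEq] at hh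
    subst hh
    rw [List.getLast?_cons_cons] at hg
    have h1 : pvFind par n (x : Int) = (r : Int) :=
      pvFind_chain hc (fun z hz => (hent z (hn' z hz)).1) n x r rfl
        (by rw [List.getLast?_cons_cons]; exact hg) hclen
    have h2 : pvFind par n ((pvPn par x : Nat) : Int) = (r : Int) := by
      rw [hc.1]
      exact pvFind_chain hc.2.2 (fun z hz => (hent z (hn' z (List.mem_cons_of_mem _ hz))).1)
        n y r rfl hg (by simp at hclen ⊢; omega)
    rw [h1, h2]

theorem forest_update {n : Nat} {par : List Int} (h : pvForest n par) {rI rJ : Nat}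
    (hI : rI < n) (hJ : rJ < n) (hrI : pvPn par rI = rI) (hrJ : pvPn par rJ = rJ) :
    pvForest n (par.set rI (rJ : Int)) ∧
    ∀ k, k < n → pvFind (par.set rI (rJ : Int)) n (k : Int) =
      (if pvFind par n (k : Int) = (rI : Int) then (rJ : Int) else pvFind par n (k : Int)) := by
  obtain ⟨hlen, hent, m, hm⟩ := h
  have hnpos : 1 ≤ n := by omega
  have hget_eq : (par.set rI (rJ : Int))[rI]? = some (rJ : Int) :=
    List.getElem?_set_self (by omega)
  have hget_ne : ∀ k : Nat, k ≠ rI → (par.set rI (rJ : Int))[k]? = par[k]? :=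
    fun k hk => List.getElem?_set_ne (fun he => hk he.symm)
  have hpn_eq : pvPn (par.set rI (rJ : Int)) rI = rJ := by
    unfold pvPn; rw [hget_eq]; simp
  have hpn_ne : ∀ k, k ≠ rI → pvPn (par.set rI (rJ : Int)) k = pvPn par k := by
    intro k hk; unfold pvPn; rw [hget_ne k hk]
  by_cases hIJ : rI = rJ
  · have heq : par.set rI ((rJ : Nat) : Int) = par := by
      apply List.ext_getElem?
      intro i
      by_cases hi : i = rI
      · rw [hi, List.getElem?_set_self (by omega), (hent rI hI).1, hrI, hIJ]
      · exact hget_ne i hi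
    rw [heq]
    refine ⟨⟨hlen, hent, m, hm⟩, fun k hk => ?_⟩
    split
    · next hcond => rw [hcond]; exact_mod_cast congrArg (fun x : Nat => (x : Int)) hIJ
    · rfl
  · have hJI : rJ ≠ rI := fun he => hIJ he.symm
    have hrJ' : pvPn (par.set rI (rJ : Int)) rJ = rJ := (hpn_ne rJ hJI).trans hrJ
    have hent' : ∀ k, k < n → (par.set rI (rJ : Int))[k]? =
        some ((pvPn (par.set rI (rJ : Int)) k : Nat) : Int) ∧
        pvPn (par.set rI (rJ : Int)) k < n := by
      intro k hk
      by_cases hkI : k = rI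
      · subst hkI; rw [hget_eq, hpn_eq]; exact ⟨rfl, hJ⟩
      · rw [hget_ne k hkI, hpn_ne k hkI]; exact hent k hk
    have hFI : pvFind par n (rI : Int) = (rI : Int) :=
      pvFind_root_self (hent rI hI).1 hrI hnpos
    have hFJ : pvFind par n (rJ : Int) = (rJ : Int) :=
      pvFind_root_self (hent rJ hJ).1 hrJ hnpos
    have hFJI : pvFind par n (rJ : Int) ≠ (rI : Int) := by
      rw [hFJ]; exact fun he => hJI (by exact_mod_cast he)
    have hmJ : m rJ = 0 := (hm rJ hJ).1 hrJ
    have main : ∀ k, k < n → pvFind (par.set rI (rJ : Int)) n (k : Int) =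
        (if pvFind par n (k : Int) = (rI : Int) then (rJ : Int) else pvFind par n (k : Int)) := by
      intro k hk
      obtain ⟨c, hc, hh, hn', hp⟩ := pvChain_exists hent hm k hk
      obtain ⟨r, hg⟩ := pvChain_getLast?_exists hc
      have hclen := pvChain_len_le hn' hp
      have hF : pvFind par n (k : Int) = (r : Int) :=
        pvFind_chain hc (fun x hx => (hent x (hn' x hx)).1) n k r hh hg hclen
      by_cases hrI' : r = rI
      · rw [hrI'] at hF hg
        rw [hF, if_pos rfl]
        have hnd : c.Nodup := hp.imp (fun {a b} hab he => by subst he; omega)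
        have hc' : pvChain (par.set rI (rJ : Int)) (c ++ [rJ]) :=
          pvChain_snoc hIJ hpn_eq hpn_ne hrJ' c hc hg hnd
        have hall : ∀ x ∈ c, pvFind par n (x : Int) = (rI : Int) := by
          intro x hx
          obtain ⟨c2, hc2, hh2, hl2, hmm2, hg2⟩ := pvChain_mem_suffix hc x hx
          exact pvFind_chain hc2 (fun z hz => (hent z (hn' z (hmm2 z hz))).1) n x rI hh2
            (by rw [hg2, hg]) (le_trans hl2 hclen)
        have hp' : (c ++ [rJ]).Pairwise (fun a b : Nat =>
            (if pvFind par n ((b : Nat) : Int) = (rI : Int) then m b + 1 else m b) <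
            (if pvFind par n ((a : Nat) : Int) = (rI : Int) then m a + 1 else m a)) := by
          rw [List.pairwise_append]
          refine ⟨hp.imp_of_mem (fun {a b} ha hb hab => ?_), List.pairwise_singleton _ _, ?_⟩
          · rw [if_pos (hall a ha), if_pos (hall b hb)]; omega
          · intro a ha b hb
            simp only [List.mem_singleton] at hb
            subst hb
            rw [if_pos (hall a ha), if_neg hFJI]
            omega
        have hn'' : ∀ x ∈ c ++ [rJ], x < n := by
          intro x hx
          rcases List.mem_append.mp hx with h1 | h1
          · exact hn' x h1
          · simp only [List.mem_singleton] at h1; subst h1; exact hJ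
        have hlen' := pvChain_len_le (m := fun x : Nat =>
          if pvFind par n ((x : Nat) : Int) = (rI : Int) then m x + 1 else m x) hn'' hp'
        have hh' : (c ++ [rJ]).head? = some k := by
          cases c with
          | nil => simp at hh
          | cons a t => simpa using hh
        exact pvFind_chain hc' (fun x hx => (hent' x (hn'' x hx)).1) n k rJ hh'
          List.getLast?_concat hlen'
      · rw [hF, if_neg (fun he => hrI' (by exact_mod_cast he))]
        have hnotin : rI ∉ c := by
          intro hin
          have hlast := pvChain_root_mem hc hin hrI
          rw [hg] at hlast
          exact hrI' (Option.some.inj hlast)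
        have hc' : pvChain (par.set rI (rJ : Int)) c :=
          pvChain_congr (fun x hx => hpn_ne x (fun he => hnotin (he ▸ hx))) hc
        exact pvFind_chain hc' (fun x hx => (hent' x (hn' x hx)).1) n k r hh hg hclen
    refine ⟨⟨by simp [hlen], hent', ⟨fun x => if pvFind par n (x : Int) = (rI : Int) then m x + 1 else m x, ?_⟩⟩, main⟩
    intro k hk
    by_cases hkI : k = rI
    · subst hkI
      constructor
      · intro h0
        rw [hpn_eq] at h0
        exact absurd h0.symm hIJ
      · intro _
        rw [hpn_eq]
        simp only
        rw [if_neg hFJI, if_pos hFI]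
        omega
    · constructor
      · intro h0
        rw [hpn_ne k hkI] at h0
        have hFk : pvFind par n (k : Int) = (k : Int) :=
          pvFind_root_self (hent k hk).1 h0 hnpos
        simp only
        rw [if_neg (by rw [hFk]; exact fun he => hkI (by exact_mod_cast he))]
        exact (hm k hk).1 h0
      · intro hne
        have hne' : pvPn par k ≠ k := by rwa [hpn_ne k hkI] at hne
        rw [hpn_ne k hkI]
        have hstep : pvFind par n (k : Int) = pvFind par n ((pvPn par k : Nat) : Int) :=
          pvFind_unroll hent hm hk hne'
        have hdec := (hm k hk).2 hne'
        simp only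
        rw [hstep]
        split <;> omega

-- combined loop invariant: A's parent array is a forest and B's label array is A's root map
def pvInv (n : Nat) (par labels : List Int) : Prop :=
  pvForest n par ∧ labels.length = n ∧
  ∀ k, k < n → labels[k]? = some (pvFind par n (k : Int))

theorem pvInv_fold {n : Nat} (es : List (Int × Int × Int))
    (hes : ∀ e ∈ es, 0 ≤ e.1 ∧ e.1 < n ∧ 0 ≤ e.2.1 ∧ e.2.1 < n) :
    ∀ par labels, pvInv n par labels →
      pvInv n
        (es.foldl (fun par e =>
          let iRep := pvFind par par.length e.1
          let jRep := pvFind par par.length e.2.1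
          par.set iRep.toNat jRep) par)
        (es.foldl (fun labels e =>
          let li := (PySem.List.pyGet? labels e.1).getD 0
          let lj := (PySem.List.pyGet? labels e.2.1).getD 0
          labels.map (fun l => if l = li then lj else l)) labels) := by
  induction es with
  | nil => intro par labels h; exact h
  | cons e es ih =>
    intro par labels h
    obtain ⟨hforest, hllen, hlab⟩ := h
    obtain ⟨he, hes'⟩ := List.forall_mem_cons.mp hes
    obtain ⟨hi0, hi1, hj0, hj1⟩ := he
    simp only [List.foldl_cons]
    set i := e.1.toNat with hidef
    set j := e.2.1.toNat with hjdef
    have hie : e.1 = (i : Int) := (Int.toNat_of_nonneg hi0).symm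
    have hje : e.2.1 = (j : Int) := (Int.toNat_of_nonneg hj0).symm
    have hiln : i < n := by omega
    have hjln : j < n := by omega
    obtain ⟨rI, hrIlt, hFi, hrootI⟩ := forest_find hforest hiln
    obtain ⟨rJ, hrJlt, hFj, hrootJ⟩ := forest_find hforest hjln
    have hAstep : (par.set (pvFind par par.length e.1).toNat (pvFind par par.length e.2.1))
        = par.set rI ((rJ : Nat) : Int) := by
      rw [hforest.1, hie, hje, hFi, hFj]
      simp
    obtain ⟨hforest', hfind'⟩ := forest_update hforest hrIlt hrJlt hrootI hrootJ
    have hli : (PySem.List.pyGet? labels e.1).getD 0 = ((rI : Nat) : Int) := by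
      rw [hie, PySem.List.pyGet?_natCast, hlab i hiln]
      simp [hFi]
    have hlj : (PySem.List.pyGet? labels e.2.1).getD 0 = ((rJ : Nat) : Int) := by
      rw [hje, PySem.List.pyGet?_natCast, hlab j hjln]
      simp [hFj]
    refine ih hes' _ _ ?_
    simp only [hAstep, hli, hlj]
    refine ⟨hforest', by simp [hllen], ?_⟩
    intro k hk
    rw [List.getElem?_map, hlab k hk, hfind' k hk]
    simp only [Option.map_some]

theorem pvInv_init (n : Nat) :
    pvInv n (PySem.List.pyRange 0 n 1) (PySem.List.pyRange 0 n 1) := by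
  have hlen : (PySem.List.pyRange 0 n 1).length = n := by
    rw [PySem.List.length_pyRange_one]; omega
  have hget : ∀ k, k < n → (PySem.List.pyRange 0 n 1)[k]? = some ((k : Nat) : Int) := by
    intro k hk
    simp [hk]
  have hpn : ∀ k, k < n → pvPn (PySem.List.pyRange 0 n 1) k = k := by
    intro k hk
    unfold pvPn
    rw [hget k hk]
    simp
  refine ⟨⟨hlen, fun k hk => ⟨by rw [hget k hk, hpn k hk], by rw [hpn k hk]; exact hk⟩,
    ⟨fun _ => 0, fun k hk => ⟨fun _ => rfl, fun hne => absurd (hpn k hk) hne⟩⟩⟩, hlen, ?_⟩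
  intro k hk
  rw [hget k hk, pvFind_root_self (by rw [hget k hk, hpn k hk]) (hpn k hk) (by omega)]

theorem pvEdges_mem {boxes : List (List Int)} {e : Int × Int × Int} (he : e ∈ pvEdges boxes) :
    0 ≤ e.1 ∧ e.1 < boxes.length ∧ 0 ≤ e.2.1 ∧ e.2.1 < boxes.length := by
  unfold pvEdges at he
  obtain ⟨i, hi, hmem⟩ := List.mem_flatMap.mp he
  obtain ⟨j, hj, heq⟩ := List.mem_map.mp hmem
  obtain ⟨hi0, hi1⟩ := PySem.List.mem_pyRange_one.mp hi
  obtain ⟨hj0, hj1⟩ := PySem.List.mem_pyRange_one.mp hj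
  subst heq
  exact ⟨hi0, hi1, (by omega : (0 : Int) ≤ j), (hj1 : j < (boxes.length : Int))⟩

theorem pvTail_eq (d : PySem.Dict Int Int) :
    (((PySem.List.sorted d.items (fun p => p.2) true).take 3).map (fun p => p.2)).foldl (· * ·) 1
    = (PySem.List.slice (PySem.List.sorted (PySem.Dict.values d) (fun x => x) true)
        none (some 3)).foldl (fun a c => a * c) 1 := by
  have hvals : PySem.Dict.values d = d.items.map (fun p => p.2) := rfl
  have hperm : ((PySem.List.sorted d.items (fun p => p.2) true).map (fun p => p.2)).Perm
      (PySem.List.sorted (PySem.Dict.values d) (fun x => x) true) := by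
    refine ((PySem.List.sorted_perm d.items (fun p => p.2) true).map _).trans ?_
    rw [← hvals]
    exact (PySem.List.sorted_perm (PySem.Dict.values d) (fun x => x) true).symm
  have hkey : (PySem.List.sorted d.items (fun p => p.2) true).map (fun p => p.2)
      = PySem.List.sorted (PySem.Dict.values d) (fun x => x) true := by
    refine List.Perm.eq_of_pairwise (le := fun a b : Int => b ≤ a) ?_ ?_ ?_ hperm
    · intro a b _ _ h1 h2; omega
    · exact List.pairwise_map.mpr (PySem.List.sorted_pairwise_rev d.items (fun p => p.2))
    · exact PySem.List.sorted_pairwise_rev (PySem.Dict.values d) (fun x => x)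
  rw [PySem.List.slice_to _ (by omega), List.map_take, hkey]
  rfl

theorem part1_main : ∀ (lines : List String) (nMin : Int), part1 lines nMin = part1_alt lines nMin := by
  intro lines nMin
  simp only [part1, part1_alt, pvJoinAll]
  set boxes := pvParseInput lines with hboxes
  set chosen := PySem.List.slice (PySem.List.sorted (pvEdges boxes) (fun e => e.2.2) false)
    none (some nMin) with hchosen
  set parF := chosen.foldl (fun par e =>
      let iRep := pvFind par par.length e.1
      let jRep := pvFind par par.length e.2.1
      par.set iRep.toNat jRep) (PySem.List.pyRange 0 boxes.length 1) with hparF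
  set labelsF := chosen.foldl (fun labels e =>
      let li := (PySem.List.pyGet? labels e.1).getD 0
      let lj := (PySem.List.pyGet? labels e.2.1).getD 0
      labels.map (fun l => if l = li then lj else l)) (PySem.List.pyRange 0 boxes.length 1)
    with hlabelsF
  have hedge : ∀ e ∈ chosen, 0 ≤ e.1 ∧ e.1 < (boxes.length : Int) ∧
      0 ≤ e.2.1 ∧ e.2.1 < (boxes.length : Int) := by
    intro e he
    have h1 := PySem.List.mem_of_mem_slice _ _ _ he
    have h2 := (PySem.List.mem_sorted _ _ _ _).mp h1
    exact pvEdges_mem h2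
  have hinv : pvInv boxes.length parF labelsF := by
    rw [hparF, hlabelsF]
    exact pvInv_fold chosen hedge _ _ (pvInv_init boxes.length)
  obtain ⟨hforest, hllen, hlab⟩ := hinv
  have hplen : parF.length = boxes.length := hforest.1
  have hkeys : (PySem.List.pyRange 0 parF.length 1).map (fun i => pvFind parF parF.length i)
      = labelsF := by
    apply List.ext_getElem?
    intro k
    rw [List.getElem?_map, hplen, PySem.List.getElem?_pyRange_one]
    by_cases hk : k < boxes.length
    · rw [if_pos (by omega), hlab k hk]
      simp
    · rw [if_neg (by omega)]
      simp only [Option.map_none]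
      symm
      rw [List.getElem?_eq_none_iff]
      omega
  rw [hkeys]
  exact pvTail_eq (pvCounter labelsF)

-- ===== VERDICT (by name: the statement is the Claim_ definition above) =====
theorem part1_spec : Claim_equal_part1 := by
  intro lines nMin _ _
  unfold Spec_part1
  exact part1_main lines nMin
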